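-- pv_equiv track=rewrite | github.com/narayanls/tac-writer | usr/share/tac-writer/core/services.py | _format_text_for_pdf
-- ===== SOURCE A (Python) =====
-- def _format_text_for_pdf(text: str) -> str:
--     """
--     Prepares text for ReportLab PDF.
--     Escapes XML characters but preserves <b>, <i>, <u> tags.
--     """
--     if not text:
--         return ""
--
--     # 1. Escape everything first to ensure safety
--     text = text.replace('&', '&amp;').replace('<', '&lt;').replace('>', '&gt;')
--
--     # 2. Restore the specific formatting tags we support
--     # ReportLab uses <b>, <i>, <u> natively
--     tags = ['b', 'i', 'u']
--     for tag in tags: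
--         text = text.replace(f'&lt;{tag}&gt;', f'<{tag}>')
--         text = text.replace(f'&lt;/{tag}&gt;', f'</{tag}>')
--
--     # Handle line breaks for PDF
--     text = text.replace('\n', '<br/>')
--
--     return text
-- ===== SOURCE B (Python) =====
-- def _format_text_for_pdf(text: str) -> str:
--     """Single left-to-right scan: copy <b>/<i>/<u> (and closing) tags through,
--     turn newlines into <br/>, and XML-escape every other character."""
--     out = []
--     i = 0
--     n = len(text)
--     while i < n:
--         c = text[i]
--         if c == '<' and text[i + 1:i + 4] in ('/b>', '/i>', '/u>'):
--             out.append(text[i:i + 4])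
--             i += 4
--         elif c == '<' and text[i + 1:i + 3] in ('b>', 'i>', 'u>'):
--             out.append(text[i:i + 3])
--             i += 3
--         elif c == '\n':
--             out.append('<br/>')
--             i += 1
--         elif c == '&':
--             out.append('&amp;')
--             i += 1
--         elif c == '<':
--             out.append('&lt;')
--             i += 1
--         elif c == '>':
--             out.append('&gt;')
--             i += 1
--         else:
--             out.append(c)
--             i += 1
--     return ''.join(out)
-- ===== Notes on version B (the rewrite author's own statement) =====
-- stated objective: alternative
-- what changed: A escapes the whole string, then runs six more replace passes to un-escape the b/i/u tags and one more for newlines; B does a single left-to-right scan that copies b/i/u tags through verbatim and escapes/translates every other character in place.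
import Mathlib
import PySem

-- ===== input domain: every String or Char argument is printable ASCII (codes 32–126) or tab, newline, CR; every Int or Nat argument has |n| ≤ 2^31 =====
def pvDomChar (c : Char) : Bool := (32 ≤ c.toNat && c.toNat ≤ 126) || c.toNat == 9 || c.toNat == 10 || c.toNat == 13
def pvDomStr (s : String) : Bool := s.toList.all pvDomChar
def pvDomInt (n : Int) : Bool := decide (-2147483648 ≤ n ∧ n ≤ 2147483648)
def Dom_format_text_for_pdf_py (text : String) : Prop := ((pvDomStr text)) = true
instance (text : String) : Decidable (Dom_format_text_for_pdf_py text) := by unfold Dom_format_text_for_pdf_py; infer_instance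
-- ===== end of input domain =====

-- B re-implements A's multi-pass escape-then-restore as one left-to-right scan (objective: alternative,
-- same observable behaviour on every string; no speed claim).

-- ===== PORT A =====
-- literal transliteration: escape &,<,>; for tag in [b,i,u] restore <tag> and </tag>; then \n -> <br/>
def format_text_for_pdf_py (text : String) : String :=
  if text = "" then "" else
    let t1 := PySem.Str.replace (PySem.Str.replace (PySem.Str.replace text "&" "&amp;") "<" "&lt;") ">" "&gt;"
    let t2 := List.foldl (fun (t : String) (tag : String) =>
        PySem.Str.replace (PySem.Str.replace t ("&lt;" ++ tag ++ "&gt;") ("<" ++ tag ++ ">"))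
          ("&lt;/" ++ tag ++ "&gt;") ("</" ++ tag ++ ">")) t1 ["b", "i", "u"]
    PySem.Str.replace t2 "\n" "<br/>"

-- ===== PORT B =====
def pvBiu (c : Char) : Bool := c == 'b' || c == 'i' || c == 'u'

-- the while-loop of Source B: closing-tag slice test first, then opening tag, then single characters
def pvScan : List Char → List Char
  | '<' :: '/' :: c :: '>' :: rest =>
      if pvBiu c then '<' :: '/' :: c :: '>' :: pvScan rest
      else '&' :: 'l' :: 't' :: ';' :: pvScan ('/' :: c :: '>' :: rest)
  | '<' :: c :: '>' :: rest =>
      if pvBiu c then '<' :: c :: '>' :: pvScan rest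
      else '&' :: 'l' :: 't' :: ';' :: pvScan (c :: '>' :: rest)
  | '\n' :: rest => '<' :: 'b' :: 'r' :: '/' :: '>' :: pvScan rest
  | '&' :: rest => '&' :: 'a' :: 'm' :: 'p' :: ';' :: pvScan rest
  | '<' :: rest => '&' :: 'l' :: 't' :: ';' :: pvScan rest
  | '>' :: rest => '&' :: 'g' :: 't' :: ';' :: pvScan rest
  | c :: rest => c :: pvScan rest
  | [] => []
termination_by l => l.length
decreasing_by all_goals simp; try omega

def format_text_for_pdf_py_alt (text : String) : String :=
  String.ofList (pvScan text.toList)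

-- ===== PRECONDITION & SPEC =====
def Spec_format_text_for_pdf_py (text : String) (out : String) : Prop := out = format_text_for_pdf_py_alt text
instance (text : String) (out : String) : Decidable (Spec_format_text_for_pdf_py text out) := by unfold Spec_format_text_for_pdf_py; infer_instance

-- ===== CLAIM (what is proved, stated in full; the proofs are below) =====
def Claim_equal_format_text_for_pdf_py : Prop := ∀ (text : String), Dom_format_text_for_pdf_py text → Spec_format_text_for_pdf_py text (format_text_for_pdf_py text)

-- ===== LEMMAS AND PROOFS =====

-- fuel-free form of PySem.Chars.replace for a nonempty pattern
def rep (old new : List Char) : List Char → List Char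
  | [] => []
  | c :: t =>
    if old.isPrefixOf (c :: t) then new ++ rep old new (List.drop (max old.length 1) (c :: t))
    else c :: rep old new t
termination_by l => l.length
decreasing_by all_goals simp [List.length_drop]; try omega

lemma rep_nil (old new : List Char) : rep old new [] = [] := by simp [rep]

lemma rep_cons (old new : List Char) (c : Char) (t : List Char) :
    rep old new (c :: t) =
      if old.isPrefixOf (c :: t) then new ++ rep old new (List.drop (max old.length 1) (c :: t))
      else c :: rep old new t := by
  rw [rep]

lemma go_eq_rep (old new : List Char) (hold : old ≠ []) :
    ∀ (fuel : Nat) (l acc : List Char), l.length ≤ fuel →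
      PySem.Chars.replace.go old new fuel l acc = acc.reverse ++ rep old new l := by
  intro fuel
  induction fuel with
  | zero => intro l acc h; interval_cases hl : l.length; simp_all [PySem.Chars.replace.go, rep_nil]
  | succ n ih =>
    intro l acc h
    match l with
    | [] => simp [PySem.Chars.replace.go, rep_nil]
    | c :: t =>
      rw [PySem.Chars.replace.go, rep_cons]
      have h' : t.length + 1 ≤ n + 1 := by simpa using h
      have hmax : max old.length 1 = old.length := by
        have : 1 ≤ old.length := by cases old <;> simp_all
        omega
      split
      · next hpre =>
        have hlen : old.length ≤ t.length + 1 := by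
          have := (List.isPrefixOf_iff_prefix.mp hpre).length_le
          simpa using this
        rw [ih _ _ (by simp; omega)]
        simp [hmax]
      · rw [ih _ _ (by simpa using Nat.le_of_succ_le_succ h)]
        simp

lemma replace_eq_rep (s old new : List Char) (hold : old ≠ []) :
    PySem.Chars.replace s old new = rep old new s := by
  rw [PySem.Chars.replace]
  simp [List.isEmpty_iff, hold]
  simpa using go_eq_rep old new hold s.length s [] le_rfl

-- chunk/step view of the input used to align all of A's passes with B's single scan
inductive Chunk where
  | tag (c : Char) (closing : Bool)
  | ch (c : Char)
deriving DecidableEq, Repr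

def step : List Char → Option (Chunk × List Char)
  | [] => none
  | '<' :: '/' :: c :: '>' :: rest =>
      if pvBiu c then some (.tag c true, rest) else some (.ch '<', '/' :: c :: '>' :: rest)
  | '<' :: c :: '>' :: rest =>
      if pvBiu c then some (.tag c false, rest) else some (.ch '<', c :: '>' :: rest)
  | c :: rest => some (.ch c, rest)

lemma step_length : ∀ (l : List Char) ch l', step l = some (ch, l') → l'.length < l.length := by
  intro l ch l' h
  rw [step.eq_def] at h
  split at h <;> (try split at h) <;>
    simp only [Option.some.injEq, Prod.mk.injEq, reduceCtorEq] at h <;>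
    (try obtain ⟨h1, h2⟩ := h) <;> subst h2 <;> simp <;> omega

lemma step_ch : ∀ (l : List Char) c l', step l = some (.ch c, l') → l = c :: l' := by
  intro l c l' h
  rw [step.eq_def] at h
  split at h <;> (try split at h) <;>
    simp only [Option.some.injEq, Prod.mk.injEq, Chunk.ch.injEq, reduceCtorEq] at h <;>
    (try obtain ⟨h1, h2⟩ := h) <;>
    first
      | exact h.elim
      | exact h1.elim
      | ((try subst h1); subst h2; rfl)

lemma step_tag : ∀ (l : List Char) c cl l', step l = some (.tag c cl, l') →
    pvBiu c = true ∧ l = (if cl then '<' :: '/' :: c :: '>' :: l' else '<' :: c :: '>' :: l') := by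
  intro l c cl l' h
  rw [step.eq_def] at h
  split at h <;> (try split at h) <;>
    simp only [Option.some.injEq, Prod.mk.injEq, Chunk.tag.injEq, reduceCtorEq] at h <;>
    (try obtain ⟨⟨h1, h3⟩, h2⟩ := h) <;>
    first
      | exact h.elim
      | exact h1.elim
      | (subst h1; subst h2; subst h3; simp_all)

lemma step_ch_lt : ∀ (l : List Char) l', step l = some (.ch '<', l') →
    (∀ c rest, pvBiu c = true → l' ≠ c :: '>' :: rest) ∧
    (∀ c rest, pvBiu c = true → l' ≠ '/' :: c :: '>' :: rest) := by
  intro l l' h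
  rw [step.eq_def] at h
  split at h <;> (try split at h) <;>
    simp only [Option.some.injEq, Prod.mk.injEq, Chunk.ch.injEq, reduceCtorEq] at h <;>
    (try obtain ⟨h1, h2⟩ := h) <;>
    first
      | exact h.elim
      | exact h1.elim
      | (subst h2; constructor <;> intro c rest hc hne <;> simp_all [pvBiu] <;>
          (obtain ⟨hx, -⟩ := hne; subst hx; rcases hc with (h | h) | h <;> simp at h))

lemma step_none : ∀ (l : List Char), step l = none → l = [] := by
  intro l h
  rw [step.eq_def] at h
  split at h <;> (try split at h) <;> simp_all

def esc (c : Char) : List Char :=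
  if c = '&' then ['&', 'a', 'm', 'p', ';']
  else if c = '<' then ['&', 'l', 't', ';']
  else if c = '>' then ['&', 'g', 't', ';']
  else [c]

-- what chunk `ck` looks like after A's escape pass and the first `s` of A's seven restore passes
def rend (s : Nat) : Chunk → List Char
  | .tag c false =>
      if (if c = 'b' then 0 else if c = 'i' then 2 else 4) < s then ['<', c, '>']
      else ['&', 'l', 't', ';', c, '&', 'g', 't', ';']
  | .tag c true =>
      if (if c = 'b' then 1 else if c = 'i' then 3 else 5) < s then ['<', '/', c, '>']
      else ['&', 'l', 't', ';', '/', c, '&', 'g', 't', ';']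
  | .ch c => if 6 < s ∧ c = '\n' then ['<', 'b', 'r', '/', '>'] else esc c

def stG (s : Nat) (l : List Char) : List Char :=
  match _h : step l with
  | none => []
  | some (c, l') => rend s c ++ stG s l'
termination_by l.length
decreasing_by exact step_length l c l' _h

lemma stG_none (s : Nat) (l : List Char) (h : step l = none) : stG s l = [] := by
  rw [stG, h]

lemma stG_some (s : Nat) (l : List Char) (c : Chunk) (l' : List Char) (h : step l = some (c, l')) :
    stG s l = rend s c ++ stG s l' := by
  rw [stG, h]

lemma biu_ne (c : Char) (h : pvBiu c = true) : c ≠ '&' ∧ c ≠ '<' ∧ c ≠ '>' ∧ c ≠ '\n' ∧ c ≠ '/' := by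
  rcases (by simpa [pvBiu] using h : (c = 'b' ∨ c = 'i') ∨ c = 'u') with (h | h) | h <;>
    subst h <;> refine ⟨by decide, by decide, by decide, by decide, by decide⟩

lemma flatMap_esc_eq_stG0 : ∀ (l : List Char), l.flatMap esc = stG 0 l := by
  intro l
  induction hn : l.length using Nat.strong_induction_on generalizing l with
  | _ n ih =>
  cases h : step l with
  | none => subst hn; rw [stG_none _ _ h, step_none _ h]; rfl
  | some p =>
    obtain ⟨c, l'⟩ := p
    have hlt := step_length _ _ _ h
    rw [stG_some _ _ _ _ h]
    cases c with
    | tag tc cl =>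
      obtain ⟨hb, hl⟩ := step_tag _ _ _ _ h
      obtain ⟨h1, h2, h3, h4, h5⟩ := biu_ne _ hb
      cases cl <;> simp at hl <;> subst hl <;>
        simp [List.flatMap_cons, esc, rend, h1, h2, h3, ih _ (by simp at hlt hn ⊢; omega) l' rfl]
    | ch cc =>
      have hl := step_ch _ _ _ h
      subst hl
      simp [List.flatMap_cons, rend, ih _ (by simp at hlt hn ⊢; omega) l' rfl]

def e1 (c : Char) : List Char := if c = '&' then ['&', 'a', 'm', 'p', ';'] else [c]
def e2 (c : Char) : List Char :=
  if c = '&' then ['&', 'a', 'm', 'p', ';'] else if c = '<' then ['&', 'l', 't', ';'] else [c]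

lemma rep_one (a : Char) (new : List Char) (f : Char → List Char)
    (hf : ∀ c, f c = if c = a then new else [c]) :
    ∀ l, rep [a] new l = l.flatMap f := by
  intro l
  induction l with
  | nil => simp [rep_nil]
  | cons c t ih =>
    rw [rep_cons]
    by_cases hc : c = a
    · subst hc; simp [List.isPrefixOf, ih, hf]
    · have hp : ([a].isPrefixOf (c :: t)) = false := by
        simp [List.isPrefixOf]; exact fun h => absurd h.symm hc
      simp [hp, ih, hf, hc]

lemma rep_skip (old new : List Char) : ∀ (chunk rest : List Char),
    (∀ k, k < chunk.length → old.isPrefixOf (List.drop k chunk ++ rest) = false) →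
    rep old new (chunk ++ rest) = chunk ++ rep old new rest := by
  intro chunk
  induction chunk with
  | nil => simp
  | cons c t ih =>
    intro rest h
    have h0 : old.isPrefixOf (c :: (t ++ rest)) = false := by simpa using h 0 (by simp)
    rw [List.cons_append, rep_cons, if_neg (by simp [h0])]
    rw [ih rest (fun k hk => by simpa using h (k + 1) (by simpa using hk))]
    simp

lemma repAmp : ∀ (l : List Char), rep ['&'] ['&', 'a', 'm', 'p', ';'] l = l.flatMap e1 :=
  rep_one '&' ['&', 'a', 'm', 'p', ';'] e1 (fun c => by simp [e1])

lemma repLt : ∀ (l : List Char), rep ['<'] ['&', 'l', 't', ';'] (l.flatMap e1) = l.flatMap e2 := by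
  intro l
  induction l with
  | nil => simp [rep_nil]
  | cons c t ih =>
    by_cases hc : c = '&'
    · subst hc
      rw [List.flatMap_cons, show e1 '&' = ['&', 'a', 'm', 'p', ';'] from rfl,
          rep_skip _ _ _ _ (by intro k hk; simp at hk; interval_cases k <;> simp [List.isPrefixOf]), ih]
      simp [e2]
    · by_cases hc2 : c = '<'
      · subst hc2
        rw [List.flatMap_cons, show e1 '<' = ['<'] from rfl, List.singleton_append, rep_cons]
        simp [List.isPrefixOf, ih, e2]
      · rw [List.flatMap_cons, show e1 c = [c] from by simp [e1, hc], List.singleton_append, rep_cons]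
        have hp : (['<'].isPrefixOf (c :: t.flatMap e1)) = false := by
          simp [List.isPrefixOf]; exact fun h => absurd h.symm hc2
        simp [hp, ih, e2, hc, hc2]

lemma repGt : ∀ (l : List Char), rep ['>'] ['&', 'g', 't', ';'] (l.flatMap e2) = l.flatMap esc := by
  intro l
  induction l with
  | nil => simp [rep_nil]
  | cons c t ih =>
    by_cases hc : c = '&'
    · subst hc
      rw [List.flatMap_cons, show e2 '&' = ['&', 'a', 'm', 'p', ';'] from rfl,
          rep_skip _ _ _ _ (by intro k hk; simp at hk; interval_cases k <;> simp [List.isPrefixOf]), ih]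
      simp [esc]
    · by_cases hc2 : c = '<'
      · subst hc2
        rw [List.flatMap_cons, show e2 '<' = ['&', 'l', 't', ';'] from rfl,
            rep_skip _ _ _ _ (by intro k hk; simp at hk; interval_cases k <;> simp [List.isPrefixOf]), ih]
        simp [esc]
      · by_cases hc3 : c = '>'
        · subst hc3
          rw [List.flatMap_cons, show e2 '>' = ['>'] from rfl, List.singleton_append, rep_cons]
          simp [List.isPrefixOf, ih, esc]
        · rw [List.flatMap_cons, show e2 c = [c] from by simp [e2, hc, hc2], List.singleton_append, rep_cons]
          have hp : (['>'].isPrefixOf (c :: t.flatMap e2)) = false := by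
            simp [List.isPrefixOf]; exact fun h => absurd h.symm hc3
          simp [hp, ih, esc, hc, hc2, hc3]

lemma rep_head (old new rest : List Char) (hold : old ≠ []) :
    rep old new (old ++ rest) = new ++ rep old new rest := by
  cases old with
  | nil => simp_all
  | cons a as =>
    rw [List.cons_append, rep_cons,
        if_pos (List.isPrefixOf_iff_prefix.mpr ⟨rest, by simp⟩)]
    have hmax : max (a :: as).length 1 = (a :: as).length := by simp
    rw [hmax, ← List.cons_append, List.drop_left]

-- what can produce '&gt;' (resp. a tag tail) at the head of a partially-restored string:
lemma aux1 (s : Nat) (hs : s ≤ 5) (m : List Char)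
    (h : (['&', 'g', 't', ';'].isPrefixOf (stG s m)) = true) : ∃ m', m = '>' :: m' := by
  cases hstep : step m with
  | none => rw [stG_none _ _ hstep] at h; simp [List.isPrefixOf] at h
  | some p =>
    obtain ⟨c, m'⟩ := p
    rw [stG_some _ _ _ _ hstep] at h
    cases c with
    | tag tc tcl =>
      obtain ⟨hb, hl⟩ := step_tag _ _ _ _ hstep
      rcases (by simpa [pvBiu] using hb : (tc = 'b' ∨ tc = 'i') ∨ tc = 'u') with (rfl | rfl) | rfl <;>
        cases tcl <;> simp only [rend, Char.reduceEq, reduceIte] at h <;> split at h <;>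
          simp [List.isPrefixOf_iff_prefix, List.cons_prefix_cons] at h
    | ch cc =>
      have hm := step_ch _ _ _ hstep
      have h6 : ¬ (6 < s ∧ cc = '\n') := by omega
      rw [rend, if_neg h6] at h
      by_cases h1 : cc = '&'
      · subst h1; simp [esc, List.isPrefixOf_iff_prefix, List.cons_prefix_cons] at h
      · by_cases h2 : cc = '<'
        · subst h2; simp [esc, List.isPrefixOf_iff_prefix, List.cons_prefix_cons] at h
        · by_cases h3 : cc = '>'
          · exact ⟨m', h3 ▸ hm⟩
          · rw [show esc cc = [cc] from by simp [esc, h1, h2, h3]] at h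
            simp [List.isPrefixOf_iff_prefix, List.cons_prefix_cons] at h
            exact absurd h.1.symm h1

lemma aux2 (s : Nat) (hs : s ≤ 5) (X : Char) (hX : pvBiu X = true) (m : List Char)
    (h : ([X, '&', 'g', 't', ';'].isPrefixOf (stG s m)) = true) : ∃ m', m = X :: '>' :: m' := by
  obtain ⟨x1, x2, x3, x4, x5⟩ := biu_ne _ hX
  cases hstep : step m with
  | none =>
    rw [stG_none _ _ hstep] at h
    simp [List.isPrefixOf] at h
  | some p =>
    obtain ⟨c, m'⟩ := p
    rw [stG_some _ _ _ _ hstep] at h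
    cases c with
    | tag tc tcl =>
      obtain ⟨hb, hl⟩ := step_tag _ _ _ _ hstep
      obtain ⟨t1, t2, t3, t4, t5⟩ := biu_ne _ hb
      rcases (by simpa [pvBiu] using hb : (tc = 'b' ∨ tc = 'i') ∨ tc = 'u') with (rfl | rfl) | rfl <;>
        cases tcl <;> simp only [rend, Char.reduceEq, reduceIte] at h <;> split at h <;>
          simp [List.isPrefixOf_iff_prefix, List.cons_prefix_cons, x2, x1] at h
    | ch cc =>
      have hm := step_ch _ _ _ hstep
      have h6 : ¬ (6 < s ∧ cc = '\n') := by omega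
      rw [rend, if_neg h6] at h
      by_cases h1 : cc = '&'
      · subst h1; simp [esc, List.isPrefixOf_iff_prefix, List.cons_prefix_cons, x1] at h
      · by_cases h2 : cc = '<'
        · subst h2; simp [esc, List.isPrefixOf_iff_prefix, List.cons_prefix_cons] at h
        · by_cases h3 : cc = '>'
          · subst h3; simp [esc, List.isPrefixOf_iff_prefix, List.cons_prefix_cons] at h
          · rw [show esc cc = [cc] from by simp [esc, h1, h2, h3]] at h
            rw [List.singleton_append] at h
            have hcx : cc = X := by
              simp [List.isPrefixOf] at h
              exact h.1.symm
            subst hcx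
            have htail : (['&', 'g', 't', ';'].isPrefixOf (stG s m')) = true := by
              simp [List.isPrefixOf] at h
              exact List.isPrefixOf_iff_prefix.mpr h
            obtain ⟨m'', hm''⟩ := aux1 s hs m' htail
            exact ⟨m'', by rw [hm, hm'']⟩

lemma aux3 (s : Nat) (hs : s ≤ 5) (X : Char) (hX : pvBiu X = true) (m : List Char)
    (h : (['/', X, '&', 'g', 't', ';'].isPrefixOf (stG s m)) = true) :
    ∃ m', m = '/' :: X :: '>' :: m' := by
  obtain ⟨x1, x2, x3, x4, x5⟩ := biu_ne _ hX
  cases hstep : step m with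
  | none =>
    rw [stG_none _ _ hstep] at h
    simp [List.isPrefixOf] at h
  | some p =>
    obtain ⟨c, m'⟩ := p
    rw [stG_some _ _ _ _ hstep] at h
    cases c with
    | tag tc tcl =>
      obtain ⟨hb, hl⟩ := step_tag _ _ _ _ hstep
      rcases (by simpa [pvBiu] using hb : (tc = 'b' ∨ tc = 'i') ∨ tc = 'u') with (rfl | rfl) | rfl <;>
        cases tcl <;> simp only [rend, Char.reduceEq, reduceIte] at h <;> split at h <;>
          simp [List.isPrefixOf_iff_prefix, List.cons_prefix_cons] at h
    | ch cc =>
      have hm := step_ch _ _ _ hstep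
      have h6 : ¬ (6 < s ∧ cc = '\n') := by omega
      rw [rend, if_neg h6] at h
      by_cases h1 : cc = '&'
      · subst h1; simp [esc, List.isPrefixOf_iff_prefix, List.cons_prefix_cons] at h
      · by_cases h2 : cc = '<'
        · subst h2; simp [esc, List.isPrefixOf_iff_prefix, List.cons_prefix_cons] at h
        · by_cases h3 : cc = '>'
          · subst h3; simp [esc, List.isPrefixOf_iff_prefix, List.cons_prefix_cons] at h
          · rw [show esc cc = [cc] from by simp [esc, h1, h2, h3]] at h
            rw [List.singleton_append] at h
            have hcx : cc = '/' := by
              simp [List.isPrefixOf] at h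
              exact h.1.symm
            subst hcx
            have htail : ([X, '&', 'g', 't', ';'].isPrefixOf (stG s m')) = true := by
              simp [List.isPrefixOf] at h
              exact List.isPrefixOf_iff_prefix.mpr h
            obtain ⟨m'', hm''⟩ := aux2 s hs X hX m' htail
            exact ⟨m'', by rw [hm, hm'']⟩

lemma stage_b_open : ∀ (l : List Char),
    rep ['&', 'l', 't', ';', 'b', '&', 'g', 't', ';'] ['<', 'b', '>'] (stG 0 l) = stG 1 l := by
  intro l
  induction hn : l.length using Nat.strong_induction_on generalizing l with
  | _ n ih =>
  cases h : step l with
  | none => rw [stG_none _ _ h, stG_none _ _ h, rep_nil]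
  | some p =>
    obtain ⟨c, l'⟩ := p
    have hlt := step_length _ _ _ h
    have hih : rep ['&', 'l', 't', ';', 'b', '&', 'g', 't', ';'] ['<', 'b', '>'] (stG 0 l') = stG 1 l' := by
      exact ih l'.length (by omega) l' rfl
    rw [stG_some 0 _ _ _ h, stG_some 1 _ _ _ h]
    cases c with
    | tag tc tcl =>
      obtain ⟨hb, -⟩ := step_tag _ _ _ _ h
      rcases (by simpa [pvBiu] using hb : (tc = 'b' ∨ tc = 'i') ∨ tc = 'u') with (rfl | rfl) | rfl <;>
        cases tcl <;>
        first
          | (rw [show rend 0 (Chunk.tag 'b' false) = ['&', 'l', 't', ';', 'b', '&', 'g', 't', ';'] from rfl,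
                rep_head _ _ _ (by simp), hih]; rfl)
          | (rw [rep_skip _ _ _ _ (by intro k hk; simp [rend] at hk; interval_cases k <;> simp [rend, List.isPrefixOf]), hih]; rfl)
    | ch cc =>
      have hl := step_ch _ _ _ h
      by_cases hcc : cc = '<'
      · subst hcc
        obtain ⟨hex1, hex2⟩ := step_ch_lt _ _ h
        rw [show rend 0 (Chunk.ch '<') = ['&', 'l', 't', ';'] from rfl,
            show rend 1 (Chunk.ch '<') = ['&', 'l', 't', ';'] from rfl]
        rw [rep_skip _ _ _ _ ?hskip, hih]
        case hskip =>
          intro k hk; simp at hk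
          interval_cases k
          · -- spanning offset: would need a real '<b>' after this '<'
            cases htail : (['b', '&', 'g', 't', ';'].isPrefixOf (stG 0 l')) with
            | false => simp [List.isPrefixOf, htail]
            | true =>
              obtain ⟨m, hm⟩ := aux2 0 (by omega) 'b' (by decide) l' htail
              exact absurd hm (hex1 'b' m (by decide))
          · simp [List.isPrefixOf]
          · simp [List.isPrefixOf]
          · simp [List.isPrefixOf]
      · -- every other character: the pattern cannot start inside its rendering
        have hr : rend 1 (Chunk.ch cc) = rend 0 (Chunk.ch cc) := by simp [rend]
        rw [hr, rep_skip _ _ _ _ ?hskip2, hih]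
        case hskip2 =>
          by_cases h1 : cc = '&'
          · subst h1; intro k hk; simp [rend, esc] at hk ⊢; interval_cases k <;> simp [List.isPrefixOf]
          · by_cases h3 : cc = '>'
            · subst h3; intro k hk; simp [rend, esc] at hk ⊢; interval_cases k <;> simp [List.isPrefixOf]
            · rw [show rend 0 (Chunk.ch cc) = [cc] from by simp [rend, esc, h1, hcc, h3]]
              intro k hk
              have hk0 : k = 0 := by simpa using hk
              subst hk0
              simp [List.isPrefixOf]
              exact fun hh => absurd hh.symm h1

lemma stage_b_close : ∀ (l : List Char),
    rep ['&', 'l', 't', ';', '/', 'b', '&', 'g', 't', ';'] ['<', '/', 'b', '>'] (stG 1 l) = stG 2 l := by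
  intro l
  induction hn : l.length using Nat.strong_induction_on generalizing l with
  | _ n ih =>
  cases h : step l with
  | none => rw [stG_none _ _ h, stG_none _ _ h, rep_nil]
  | some p =>
    obtain ⟨c, l'⟩ := p
    have hlt := step_length _ _ _ h
    have hih : rep ['&', 'l', 't', ';', '/', 'b', '&', 'g', 't', ';'] ['<', '/', 'b', '>'] (stG 1 l') = stG 2 l' := by
      exact ih l'.length (by omega) l' rfl
    rw [stG_some 1 _ _ _ h, stG_some 2 _ _ _ h]
    cases c with
    | tag tc tcl =>
      obtain ⟨hb, -⟩ := step_tag _ _ _ _ h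
      rcases (by simpa [pvBiu] using hb : (tc = 'b' ∨ tc = 'i') ∨ tc = 'u') with (rfl | rfl) | rfl <;>
        cases tcl <;>
        first
          | (rw [show rend 1 (Chunk.tag 'b' true) = ['&', 'l', 't', ';', '/', 'b', '&', 'g', 't', ';'] from rfl,
                rep_head _ _ _ (by simp), hih]; rfl)
          | (rw [rep_skip _ _ _ _ (by intro k hk; simp [rend] at hk; interval_cases k <;> simp [rend, List.isPrefixOf]), hih]; rfl)
    | ch cc =>
      have hl := step_ch _ _ _ h
      by_cases hcc : cc = '<'
      · subst hcc
        obtain ⟨hex1, hex2⟩ := step_ch_lt _ _ h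
        rw [show rend 1 (Chunk.ch '<') = ['&', 'l', 't', ';'] from rfl,
            show rend 2 (Chunk.ch '<') = ['&', 'l', 't', ';'] from rfl]
        rw [rep_skip _ _ _ _ ?hskip, hih]
        case hskip =>
          intro k hk; simp at hk
          interval_cases k
          · -- spanning offset: would need a real '<b>' after this '<'
            cases htail : (['/', 'b', '&', 'g', 't', ';'].isPrefixOf (stG 1 l')) with
            | false => simp [List.isPrefixOf, htail]
            | true =>
              obtain ⟨m, hm⟩ := aux3 1 (by omega) 'b' (by decide) l' htail
              exact absurd hm (hex2 'b' m (by decide))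
          · simp [List.isPrefixOf]
          · simp [List.isPrefixOf]
          · simp [List.isPrefixOf]
      · -- every other character: the pattern cannot start inside its rendering
        have hr : rend 2 (Chunk.ch cc) = rend 1 (Chunk.ch cc) := by simp [rend]
        rw [hr, rep_skip _ _ _ _ ?hskip2, hih]
        case hskip2 =>
          by_cases h1 : cc = '&'
          · subst h1; intro k hk; simp [rend, esc] at hk ⊢; interval_cases k <;> simp [List.isPrefixOf]
          · by_cases h3 : cc = '>'
            · subst h3; intro k hk; simp [rend, esc] at hk ⊢; interval_cases k <;> simp [List.isPrefixOf]
            · rw [show rend 1 (Chunk.ch cc) = [cc] from by simp [rend, esc, h1, hcc, h3]]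
              intro k hk
              have hk0 : k = 0 := by simpa using hk
              subst hk0
              simp [List.isPrefixOf]
              exact fun hh => absurd hh.symm h1

lemma stage_i_open : ∀ (l : List Char),
    rep ['&', 'l', 't', ';', 'i', '&', 'g', 't', ';'] ['<', 'i', '>'] (stG 2 l) = stG 3 l := by
  intro l
  induction hn : l.length using Nat.strong_induction_on generalizing l with
  | _ n ih =>
  cases h : step l with
  | none => rw [stG_none _ _ h, stG_none _ _ h, rep_nil]
  | some p =>
    obtain ⟨c, l'⟩ := p
    have hlt := step_length _ _ _ h
    have hih : rep ['&', 'l', 't', ';', 'i', '&', 'g', 't', ';'] ['<', 'i', '>'] (stG 2 l') = stG 3 l' := by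
      exact ih l'.length (by omega) l' rfl
    rw [stG_some 2 _ _ _ h, stG_some 3 _ _ _ h]
    cases c with
    | tag tc tcl =>
      obtain ⟨hb, -⟩ := step_tag _ _ _ _ h
      rcases (by simpa [pvBiu] using hb : (tc = 'b' ∨ tc = 'i') ∨ tc = 'u') with (rfl | rfl) | rfl <;>
        cases tcl <;>
        first
          | (rw [show rend 2 (Chunk.tag 'i' false) = ['&', 'l', 't', ';', 'i', '&', 'g', 't', ';'] from rfl,
                rep_head _ _ _ (by simp), hih]; rfl)
          | (rw [rep_skip _ _ _ _ (by intro k hk; simp [rend] at hk; interval_cases k <;> simp [rend, List.isPrefixOf]), hih]; rfl)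
    | ch cc =>
      have hl := step_ch _ _ _ h
      by_cases hcc : cc = '<'
      · subst hcc
        obtain ⟨hex1, hex2⟩ := step_ch_lt _ _ h
        rw [show rend 2 (Chunk.ch '<') = ['&', 'l', 't', ';'] from rfl,
            show rend 3 (Chunk.ch '<') = ['&', 'l', 't', ';'] from rfl]
        rw [rep_skip _ _ _ _ ?hskip, hih]
        case hskip =>
          intro k hk; simp at hk
          interval_cases k
          · -- spanning offset: would need a real '<b>' after this '<'
            cases htail : (['i', '&', 'g', 't', ';'].isPrefixOf (stG 2 l')) with
            | false => simp [List.isPrefixOf, htail]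
            | true =>
              obtain ⟨m, hm⟩ := aux2 2 (by omega) 'i' (by decide) l' htail
              exact absurd hm (hex1 'i' m (by decide))
          · simp [List.isPrefixOf]
          · simp [List.isPrefixOf]
          · simp [List.isPrefixOf]
      · -- every other character: the pattern cannot start inside its rendering
        have hr : rend 3 (Chunk.ch cc) = rend 2 (Chunk.ch cc) := by simp [rend]
        rw [hr, rep_skip _ _ _ _ ?hskip2, hih]
        case hskip2 =>
          by_cases h1 : cc = '&'
          · subst h1; intro k hk; simp [rend, esc] at hk ⊢; interval_cases k <;> simp [List.isPrefixOf]
          · by_cases h3 : cc = '>'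
            · subst h3; intro k hk; simp [rend, esc] at hk ⊢; interval_cases k <;> simp [List.isPrefixOf]
            · rw [show rend 2 (Chunk.ch cc) = [cc] from by simp [rend, esc, h1, hcc, h3]]
              intro k hk
              have hk0 : k = 0 := by simpa using hk
              subst hk0
              simp [List.isPrefixOf]
              exact fun hh => absurd hh.symm h1

lemma stage_i_close : ∀ (l : List Char),
    rep ['&', 'l', 't', ';', '/', 'i', '&', 'g', 't', ';'] ['<', '/', 'i', '>'] (stG 3 l) = stG 4 l := by
  intro l
  induction hn : l.length using Nat.strong_induction_on generalizing l with
  | _ n ih =>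
  cases h : step l with
  | none => rw [stG_none _ _ h, stG_none _ _ h, rep_nil]
  | some p =>
    obtain ⟨c, l'⟩ := p
    have hlt := step_length _ _ _ h
    have hih : rep ['&', 'l', 't', ';', '/', 'i', '&', 'g', 't', ';'] ['<', '/', 'i', '>'] (stG 3 l') = stG 4 l' := by
      exact ih l'.length (by omega) l' rfl
    rw [stG_some 3 _ _ _ h, stG_some 4 _ _ _ h]
    cases c with
    | tag tc tcl =>
      obtain ⟨hb, -⟩ := step_tag _ _ _ _ h
      rcases (by simpa [pvBiu] using hb : (tc = 'b' ∨ tc = 'i') ∨ tc = 'u') with (rfl | rfl) | rfl <;>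
        cases tcl <;>
        first
          | (rw [show rend 3 (Chunk.tag 'i' true) = ['&', 'l', 't', ';', '/', 'i', '&', 'g', 't', ';'] from rfl,
                rep_head _ _ _ (by simp), hih]; rfl)
          | (rw [rep_skip _ _ _ _ (by intro k hk; simp [rend] at hk; interval_cases k <;> simp [rend, List.isPrefixOf]), hih]; rfl)
    | ch cc =>
      have hl := step_ch _ _ _ h
      by_cases hcc : cc = '<'
      · subst hcc
        obtain ⟨hex1, hex2⟩ := step_ch_lt _ _ h
        rw [show rend 3 (Chunk.ch '<') = ['&', 'l', 't', ';'] from rfl,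
            show rend 4 (Chunk.ch '<') = ['&', 'l', 't', ';'] from rfl]
        rw [rep_skip _ _ _ _ ?hskip, hih]
        case hskip =>
          intro k hk; simp at hk
          interval_cases k
          · -- spanning offset: would need a real '<b>' after this '<'
            cases htail : (['/', 'i', '&', 'g', 't', ';'].isPrefixOf (stG 3 l')) with
            | false => simp [List.isPrefixOf, htail]
            | true =>
              obtain ⟨m, hm⟩ := aux3 3 (by omega) 'i' (by decide) l' htail
              exact absurd hm (hex2 'i' m (by decide))
          · simp [List.isPrefixOf]
          · simp [List.isPrefixOf]
          · simp [List.isPrefixOf]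
      · -- every other character: the pattern cannot start inside its rendering
        have hr : rend 4 (Chunk.ch cc) = rend 3 (Chunk.ch cc) := by simp [rend]
        rw [hr, rep_skip _ _ _ _ ?hskip2, hih]
        case hskip2 =>
          by_cases h1 : cc = '&'
          · subst h1; intro k hk; simp [rend, esc] at hk ⊢; interval_cases k <;> simp [List.isPrefixOf]
          · by_cases h3 : cc = '>'
            · subst h3; intro k hk; simp [rend, esc] at hk ⊢; interval_cases k <;> simp [List.isPrefixOf]
            · rw [show rend 3 (Chunk.ch cc) = [cc] from by simp [rend, esc, h1, hcc, h3]]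
              intro k hk
              have hk0 : k = 0 := by simpa using hk
              subst hk0
              simp [List.isPrefixOf]
              exact fun hh => absurd hh.symm h1

lemma stage_u_open : ∀ (l : List Char),
    rep ['&', 'l', 't', ';', 'u', '&', 'g', 't', ';'] ['<', 'u', '>'] (stG 4 l) = stG 5 l := by
  intro l
  induction hn : l.length using Nat.strong_induction_on generalizing l with
  | _ n ih =>
  cases h : step l with
  | none => rw [stG_none _ _ h, stG_none _ _ h, rep_nil]
  | some p =>
    obtain ⟨c, l'⟩ := p
    have hlt := step_length _ _ _ h
    have hih : rep ['&', 'l', 't', ';', 'u', '&', 'g', 't', ';'] ['<', 'u', '>'] (stG 4 l') = stG 5 l' := by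
      exact ih l'.length (by omega) l' rfl
    rw [stG_some 4 _ _ _ h, stG_some 5 _ _ _ h]
    cases c with
    | tag tc tcl =>
      obtain ⟨hb, -⟩ := step_tag _ _ _ _ h
      rcases (by simpa [pvBiu] using hb : (tc = 'b' ∨ tc = 'i') ∨ tc = 'u') with (rfl | rfl) | rfl <;>
        cases tcl <;>
        first
          | (rw [show rend 4 (Chunk.tag 'u' false) = ['&', 'l', 't', ';', 'u', '&', 'g', 't', ';'] from rfl,
                rep_head _ _ _ (by simp), hih]; rfl)
          | (rw [rep_skip _ _ _ _ (by intro k hk; simp [rend] at hk; interval_cases k <;> simp [rend, List.isPrefixOf]), hih]; rfl)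
    | ch cc =>
      have hl := step_ch _ _ _ h
      by_cases hcc : cc = '<'
      · subst hcc
        obtain ⟨hex1, hex2⟩ := step_ch_lt _ _ h
        rw [show rend 4 (Chunk.ch '<') = ['&', 'l', 't', ';'] from rfl,
            show rend 5 (Chunk.ch '<') = ['&', 'l', 't', ';'] from rfl]
        rw [rep_skip _ _ _ _ ?hskip, hih]
        case hskip =>
          intro k hk; simp at hk
          interval_cases k
          · -- spanning offset: would need a real '<b>' after this '<'
            cases htail : (['u', '&', 'g', 't', ';'].isPrefixOf (stG 4 l')) with
            | false => simp [List.isPrefixOf, htail]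
            | true =>
              obtain ⟨m, hm⟩ := aux2 4 (by omega) 'u' (by decide) l' htail
              exact absurd hm (hex1 'u' m (by decide))
          · simp [List.isPrefixOf]
          · simp [List.isPrefixOf]
          · simp [List.isPrefixOf]
      · -- every other character: the pattern cannot start inside its rendering
        have hr : rend 5 (Chunk.ch cc) = rend 4 (Chunk.ch cc) := by simp [rend]
        rw [hr, rep_skip _ _ _ _ ?hskip2, hih]
        case hskip2 =>
          by_cases h1 : cc = '&'
          · subst h1; intro k hk; simp [rend, esc] at hk ⊢; interval_cases k <;> simp [List.isPrefixOf]
          · by_cases h3 : cc = '>'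
            · subst h3; intro k hk; simp [rend, esc] at hk ⊢; interval_cases k <;> simp [List.isPrefixOf]
            · rw [show rend 4 (Chunk.ch cc) = [cc] from by simp [rend, esc, h1, hcc, h3]]
              intro k hk
              have hk0 : k = 0 := by simpa using hk
              subst hk0
              simp [List.isPrefixOf]
              exact fun hh => absurd hh.symm h1

lemma stage_u_close : ∀ (l : List Char),
    rep ['&', 'l', 't', ';', '/', 'u', '&', 'g', 't', ';'] ['<', '/', 'u', '>'] (stG 5 l) = stG 6 l := by
  intro l
  induction hn : l.length using Nat.strong_induction_on generalizing l with
  | _ n ih =>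
  cases h : step l with
  | none => rw [stG_none _ _ h, stG_none _ _ h, rep_nil]
  | some p =>
    obtain ⟨c, l'⟩ := p
    have hlt := step_length _ _ _ h
    have hih : rep ['&', 'l', 't', ';', '/', 'u', '&', 'g', 't', ';'] ['<', '/', 'u', '>'] (stG 5 l') = stG 6 l' := by
      exact ih l'.length (by omega) l' rfl
    rw [stG_some 5 _ _ _ h, stG_some 6 _ _ _ h]
    cases c with
    | tag tc tcl =>
      obtain ⟨hb, -⟩ := step_tag _ _ _ _ h
      rcases (by simpa [pvBiu] using hb : (tc = 'b' ∨ tc = 'i') ∨ tc = 'u') with (rfl | rfl) | rfl <;>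
        cases tcl <;>
        first
          | (rw [show rend 5 (Chunk.tag 'u' true) = ['&', 'l', 't', ';', '/', 'u', '&', 'g', 't', ';'] from rfl,
                rep_head _ _ _ (by simp), hih]; rfl)
          | (rw [rep_skip _ _ _ _ (by intro k hk; simp [rend] at hk; interval_cases k <;> simp [rend, List.isPrefixOf]), hih]; rfl)
    | ch cc =>
      have hl := step_ch _ _ _ h
      by_cases hcc : cc = '<'
      · subst hcc
        obtain ⟨hex1, hex2⟩ := step_ch_lt _ _ h
        rw [show rend 5 (Chunk.ch '<') = ['&', 'l', 't', ';'] from rfl,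
            show rend 6 (Chunk.ch '<') = ['&', 'l', 't', ';'] from rfl]
        rw [rep_skip _ _ _ _ ?hskip, hih]
        case hskip =>
          intro k hk; simp at hk
          interval_cases k
          · -- spanning offset: would need a real '<b>' after this '<'
            cases htail : (['/', 'u', '&', 'g', 't', ';'].isPrefixOf (stG 5 l')) with
            | false => simp [List.isPrefixOf, htail]
            | true =>
              obtain ⟨m, hm⟩ := aux3 5 (by omega) 'u' (by decide) l' htail
              exact absurd hm (hex2 'u' m (by decide))
          · simp [List.isPrefixOf]
          · simp [List.isPrefixOf]
          · simp [List.isPrefixOf]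
      · -- every other character: the pattern cannot start inside its rendering
        have hr : rend 6 (Chunk.ch cc) = rend 5 (Chunk.ch cc) := by simp [rend]
        rw [hr, rep_skip _ _ _ _ ?hskip2, hih]
        case hskip2 =>
          by_cases h1 : cc = '&'
          · subst h1; intro k hk; simp [rend, esc] at hk ⊢; interval_cases k <;> simp [List.isPrefixOf]
          · by_cases h3 : cc = '>'
            · subst h3; intro k hk; simp [rend, esc] at hk ⊢; interval_cases k <;> simp [List.isPrefixOf]
            · rw [show rend 5 (Chunk.ch cc) = [cc] from by simp [rend, esc, h1, hcc, h3]]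
              intro k hk
              have hk0 : k = 0 := by simpa using hk
              subst hk0
              simp [List.isPrefixOf]
              exact fun hh => absurd hh.symm h1

-- the final pass: newlines
lemma rep_newline : ∀ (l : List Char), rep ['\n'] ['<', 'b', 'r', '/', '>'] (stG 6 l) = stG 7 l := by
  intro l
  induction hn : l.length using Nat.strong_induction_on generalizing l with
  | _ n ih =>
  cases h : step l with
  | none => rw [stG_none _ _ h, stG_none _ _ h, rep_nil]
  | some p =>
    obtain ⟨c, l'⟩ := p
    have hlt := step_length _ _ _ h
    have hih : rep ['\n'] ['<', 'b', 'r', '/', '>'] (stG 6 l') = stG 7 l' := ih l'.length (by omega) l' rfl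
    rw [stG_some 6 _ _ _ h, stG_some 7 _ _ _ h]
    cases c with
    | tag tc tcl =>
      obtain ⟨hb, -⟩ := step_tag _ _ _ _ h
      rcases (by simpa [pvBiu] using hb : (tc = 'b' ∨ tc = 'i') ∨ tc = 'u') with (rfl | rfl) | rfl <;>
        cases tcl <;>
        (rw [rep_skip _ _ _ _ (by intro k hk; simp [rend] at hk; interval_cases k <;> simp [rend, List.isPrefixOf]), hih]; rfl)
    | ch cc =>
      by_cases hcc : cc = '\n'
      · subst hcc
        rw [show rend 6 (Chunk.ch '\n') = ['\n'] from rfl, rep_head _ _ _ (by simp), hih]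
        rfl
      · have hr : rend 7 (Chunk.ch cc) = rend 6 (Chunk.ch cc) := by simp [rend, hcc]
        rw [hr, rep_skip _ _ _ _ ?hskip2, hih]
        case hskip2 =>
          by_cases h1 : cc = '&'
          · subst h1; intro k hk; simp [rend, esc] at hk ⊢; interval_cases k <;> simp [List.isPrefixOf]
          · by_cases h2 : cc = '<'
            · subst h2; intro k hk; simp [rend, esc] at hk ⊢; interval_cases k <;> simp [List.isPrefixOf]
            · by_cases h3 : cc = '>'
              · subst h3; intro k hk; simp [rend, esc] at hk ⊢; interval_cases k <;> simp [List.isPrefixOf]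
              · rw [show rend 6 (Chunk.ch cc) = [cc] from by simp [rend, esc, h1, h2, h3]]
                intro k hk
                have hk0 : k = 0 := by simpa using hk
                subst hk0
                simp [List.isPrefixOf]
                exact fun hh => absurd hh.symm hcc

lemma pvScan_plain (c : Char) (h1 : c ≠ '<') (h2 : c ≠ '\n') (h3 : c ≠ '&') (h4 : c ≠ '>')
    (rest : List Char) : pvScan (c :: rest) = c :: pvScan rest := by
  rw [pvScan.eq_def]
  split <;> simp_all

lemma pvScan_lt (l' : List Char)
    (hex1 : ∀ c rest, pvBiu c = true → l' ≠ c :: '>' :: rest)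
    (hex2 : ∀ c rest, pvBiu c = true → l' ≠ '/' :: c :: '>' :: rest) :
    pvScan ('<' :: l') = '&' :: 'l' :: 't' :: ';' :: pvScan l' := by
  rw [pvScan.eq_def]
  split <;> (try split) <;> simp_all
  rename_i a b hlt d heq
  exact absurd heq.1.symm hlt

lemma stG7_eq_scan : ∀ (l : List Char), stG 7 l = pvScan l := by
  intro l
  induction hn : l.length using Nat.strong_induction_on generalizing l with
  | _ n ih =>
  cases h : step l with
  | none => rw [stG_none _ _ h, step_none _ h, pvScan]
  | some p =>
    obtain ⟨c, l'⟩ := p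
    have hlt := step_length _ _ _ h
    have hih : stG 7 l' = pvScan l' := ih l'.length (by omega) l' rfl
    rw [stG_some 7 _ _ _ h]
    cases c with
    | tag tc tcl =>
      obtain ⟨hb, hl⟩ := step_tag _ _ _ _ h
      rcases (by simpa [pvBiu] using hb : (tc = 'b' ∨ tc = 'i') ∨ tc = 'u') with (rfl | rfl) | rfl <;>
        cases tcl <;> simp at hl <;> subst hl <;>
          simp [pvScan, pvBiu, rend, hih]
    | ch cc =>
      have hl := step_ch _ _ _ h
      subst hl
      by_cases hcc : cc = '<'
      · subst hcc
        obtain ⟨hex1, hex2⟩ := step_ch_lt _ _ h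
        rw [pvScan_lt l' hex1 hex2, hih]
        rfl
      · by_cases h2 : cc = '\n'
        · subst h2; simp [pvScan, rend, hih]
        · by_cases h3 : cc = '&'
          · subst h3; simp [pvScan, rend, esc, hih]
          · by_cases h4 : cc = '>'
            · subst h4; simp [pvScan, rend, esc, hih]
            · rw [pvScan_plain cc hcc h2 h3 h4,
                  show rend 7 (Chunk.ch cc) = [cc] from by simp [rend, esc, h2, h3, h4, hcc], hih]
              simp

-- bridge from String-level replace to the list-level fuel-free form
lemma strrep (s old new : String) (h : old.toList ≠ []) :
    PySem.Str.replace s old new = String.ofList (rep old.toList new.toList s.toList) := by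
  simp [PySem.Str.replace, replace_eq_rep _ _ _ h]

-- ===== VERDICT (by name: the statement is the Claim_ definition above) =====
theorem format_text_for_pdf_py_spec : Claim_equal_format_text_for_pdf_py := by
  unfold Claim_equal_format_text_for_pdf_py
  intro text _
  unfold Spec_format_text_for_pdf_py format_text_for_pdf_py format_text_for_pdf_py_alt
  by_cases htext : text = ""
  · subst htext
    rw [if_pos rfl, show ("".toList) = ([] : List Char) from by decide, pvScan]
  · rw [if_neg htext]
    simp only [List.foldl_cons, List.foldl_nil]
    rw [strrep text "&" "&amp;" (by decide)]
    rw [strrep _ "<" "&lt;" (by decide)]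
    rw [strrep _ ">" "&gt;" (by decide)]
    rw [strrep _ ("&lt;" ++ "b" ++ "&gt;") ("<" ++ "b" ++ ">") (by decide)]
    rw [strrep _ ("&lt;/" ++ "b" ++ "&gt;") ("</" ++ "b" ++ ">") (by decide)]
    rw [strrep _ ("&lt;" ++ "i" ++ "&gt;") ("<" ++ "i" ++ ">") (by decide)]
    rw [strrep _ ("&lt;/" ++ "i" ++ "&gt;") ("</" ++ "i" ++ ">") (by decide)]
    rw [strrep _ ("&lt;" ++ "u" ++ "&gt;") ("<" ++ "u" ++ ">") (by decide)]
    rw [strrep _ ("&lt;/" ++ "u" ++ "&gt;") ("</" ++ "u" ++ ">") (by decide)]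
    rw [strrep _ "\n" "<br/>" (by decide)]
    simp only [String.toList_ofList]
    rw [show ("&".toList) = ['&'] from by decide,
        show ("&amp;".toList) = ['&', 'a', 'm', 'p', ';'] from by decide,
        show ("<".toList) = ['<'] from by decide,
        show ("&lt;".toList) = ['&', 'l', 't', ';'] from by decide,
        show (">".toList) = ['>'] from by decide,
        show ("&gt;".toList) = ['&', 'g', 't', ';'] from by decide,
        show (("&lt;" ++ "b" ++ "&gt;").toList) = ['&', 'l', 't', ';', 'b', '&', 'g', 't', ';'] from by decide,
        show (("<" ++ "b" ++ ">").toList) = ['<', 'b', '>'] from by decide,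
        show (("&lt;/" ++ "b" ++ "&gt;").toList) = ['&', 'l', 't', ';', '/', 'b', '&', 'g', 't', ';'] from by decide,
        show (("</" ++ "b" ++ ">").toList) = ['<', '/', 'b', '>'] from by decide,
        show (("&lt;" ++ "i" ++ "&gt;").toList) = ['&', 'l', 't', ';', 'i', '&', 'g', 't', ';'] from by decide,
        show (("<" ++ "i" ++ ">").toList) = ['<', 'i', '>'] from by decide,
        show (("&lt;/" ++ "i" ++ "&gt;").toList) = ['&', 'l', 't', ';', '/', 'i', '&', 'g', 't', ';'] from by decide,
        show (("</" ++ "i" ++ ">").toList) = ['<', '/', 'i', '>'] from by decide,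
        show (("&lt;" ++ "u" ++ "&gt;").toList) = ['&', 'l', 't', ';', 'u', '&', 'g', 't', ';'] from by decide,
        show (("<" ++ "u" ++ ">").toList) = ['<', 'u', '>'] from by decide,
        show (("&lt;/" ++ "u" ++ "&gt;").toList) = ['&', 'l', 't', ';', '/', 'u', '&', 'g', 't', ';'] from by decide,
        show (("</" ++ "u" ++ ">").toList) = ['<', '/', 'u', '>'] from by decide,
        show ("\n".toList) = ['\n'] from by decide,
        show ("<br/>".toList) = ['<', 'b', 'r', '/', '>'] from by decide]
    rw [repAmp, repLt, repGt, flatMap_esc_eq_stG0, stage_b_open, stage_b_close, stage_i_open,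
        stage_i_close, stage_u_open, stage_u_close, rep_newline, stG7_eq_scan]
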